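-- pv_equiv track=rewrite | github.com/monarch-initiative/mondo-ingest | src/scripts/utils.py | _get_next_available_mondo_id
-- ===== SOURCE A (Python) =====
-- from typing import Dict, List, Set, Union
--
-- def _get_next_available_mondo_id(min_id: int, max_id: int, mondo_ids: Set[int]) -> (int, Set[int]):
--     """Starting from `min_id`, count up and check until finding the next ID.
--
--     :returns: (int) next mondo ID; (Set[int]) New set of Mondo IDs, assuming 'next mondo ID' is included."""
--     next_id = int(min_id)
--     while True:
--         next_id = next_id + 1
--         if next_id > max_id:
--             raise ValueError('Ran out of valid IDs to assign for new slurpable Mondo terms. Either `min_id`, `max_id`, '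
--                              'or both should be changed to allow for new assignments.')
--         if next_id not in mondo_ids:
--             break
--     mondo_ids.add(next_id)
--     return next_id, mondo_ids
-- ===== SOURCE B (Python) =====
-- def _get_next_available_mondo_id(min_id: int, max_id: int, mondo_ids):
--     expected = min_id + 1
--     for x in sorted(i for i in mondo_ids if min_id < i <= max_id):
--         if x < expected:
--             continue
--         if x == expected:
--             expected += 1
--         else:
--             break
--     if expected > max_id:
--         raise ValueError('Ran out of valid IDs to assign for new slurpable Mondo terms. Either `min_id`, `max_id`, '
--                          'or both should be changed to allow for new assignments.')
--     mondo_ids.add(expected)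
--     return expected, mondo_ids
-- ===== Notes on version B (the rewrite author's own statement) =====
-- stated objective: alternative
-- what changed: Replaces A's unbounded count-up membership-probe loop (one set lookup per candidate id) by a single pass: filter the ids to (min_id, max_id], sort them, and scan the sorted list once for the first gap starting at min_id+1.
import Mathlib
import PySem

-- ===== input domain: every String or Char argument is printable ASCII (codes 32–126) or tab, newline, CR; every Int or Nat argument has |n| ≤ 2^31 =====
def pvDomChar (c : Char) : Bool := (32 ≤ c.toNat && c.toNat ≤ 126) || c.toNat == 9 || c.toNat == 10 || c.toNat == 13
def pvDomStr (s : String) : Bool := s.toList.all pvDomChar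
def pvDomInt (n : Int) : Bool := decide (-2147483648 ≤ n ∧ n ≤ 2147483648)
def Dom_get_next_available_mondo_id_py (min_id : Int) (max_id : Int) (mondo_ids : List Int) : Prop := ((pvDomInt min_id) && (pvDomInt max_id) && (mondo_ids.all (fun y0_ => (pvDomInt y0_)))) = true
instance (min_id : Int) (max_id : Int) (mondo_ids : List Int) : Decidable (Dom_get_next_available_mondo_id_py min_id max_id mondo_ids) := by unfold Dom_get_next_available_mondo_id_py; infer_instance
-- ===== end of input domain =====

-- B replaces A's count-up membership-probe loop by filter-to-range + sort + one scan for the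
-- first gap; same result and same set mutation (objective: alternative algorithm).

-- ===== PORT A =====
-- A's 'while True' loop; fuel (max_id - min_id).toNat + 1 is reached exactly when the loop
-- would raise ValueError (next_id > max_id), where the port returns the dummy 0 — those
-- inputs are excluded by Pre_ below.
def pvALoop (max_id : Int) (ids : List Int) (next_id : Int) : Nat → Int
  | 0 => 0
  | fuel+1 =>
    let n := next_id + 1
    if n > max_id then 0            -- Python raises ValueError here (outside Pre_)
    else if ids.contains n then pvALoop max_id ids n fuel
    else n

def get_next_available_mondo_id_py (min_id : Int) (max_id : Int) (mondo_ids : List Int) : Int × List Int :=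
  let next_id := pvALoop max_id mondo_ids min_id ((max_id - min_id).toNat + 1)
  (next_id, PySem.Set.add mondo_ids next_id)

-- ===== PORT B =====
-- the scan of Source B: skip x < expected, bump on x == expected, stop at the first gap
def pvBScan (expected : Int) : List Int → Int
  | [] => expected
  | x :: rest =>
    if x < expected then pvBScan expected rest
    else if x = expected then pvBScan (expected + 1) rest
    else expected

def get_next_available_mondo_id_py_alt (min_id : Int) (max_id : Int) (mondo_ids : List Int) : Int × List Int :=
  let cands := PySem.List.sorted (mondo_ids.filter (fun i => decide (min_id < i) && decide (i ≤ max_id))) (fun x => x) false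
  let expected := pvBScan (min_id + 1) cands
  if expected > max_id then (0, mondo_ids)   -- Python raises ValueError here (outside Pre_)
  else (expected, PySem.Set.add mondo_ids expected)

-- ===== PRECONDITION & SPEC =====
-- Pre_ excludes exactly the inputs on which A raises ValueError: there must be some id in
-- (min_id, max_id] missing from mondo_ids.
def Pre_get_next_available_mondo_id_py (min_id : Int) (max_id : Int) (mondo_ids : List Int) : Prop :=
  ((PySem.Set.ofList (mondo_ids.filter (fun i => decide (min_id < i) && decide (i ≤ max_id)))).length : Int) < max_id - min_id
instance (min_id : Int) (max_id : Int) (mondo_ids : List Int) : Decidable (Pre_get_next_available_mondo_id_py min_id max_id mondo_ids) := by unfold Pre_get_next_available_mondo_id_py; infer_instance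

def pvWitness_get_next_available_mondo_id_py : Int × Int × List Int := (0, 10, [1, 2])

def Spec_get_next_available_mondo_id_py (min_id : Int) (max_id : Int) (mondo_ids : List Int) (out : Int × List Int) : Prop := out = get_next_available_mondo_id_py_alt min_id max_id mondo_ids
instance (min_id : Int) (max_id : Int) (mondo_ids : List Int) (out : Int × List Int) : Decidable (Spec_get_next_available_mondo_id_py min_id max_id mondo_ids out) := by unfold Spec_get_next_available_mondo_id_py; infer_instance

-- ===== CLAIM (what is proved, stated in full; the proofs are below) =====
def Claim_equal_get_next_available_mondo_id_py : Prop := ∀ (min_id : Int) (max_id : Int) (mondo_ids : List Int), Dom_get_next_available_mondo_id_py min_id max_id mondo_ids → Pre_get_next_available_mondo_id_py min_id max_id mondo_ids → Spec_get_next_available_mondo_id_py min_id max_id mondo_ids (get_next_available_mondo_id_py min_id max_id mondo_ids)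

-- ===== LEMMAS AND PROOFS =====

-- pigeonhole: fewer distinct in-range ids than slots in (min_id, max_id] means some id is free
theorem pvPre_exists (min_id max_id : Int) (ids : List Int)
    (hpre : Pre_get_next_available_mondo_id_py min_id max_id ids) :
    ∃ n, min_id < n ∧ n ≤ max_id ∧ n ∉ ids := by
  unfold Pre_get_next_available_mondo_id_py at hpre
  by_contra hno
  push Not at hno
  set l := PySem.Set.ofList (ids.filter (fun i => decide (min_id < i) && decide (i ≤ max_id))) with hl
  have hsub : Finset.Ioc min_id max_id ⊆ l.toFinset := by
    intro n hn
    rw [Finset.mem_Ioc] at hn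
    rw [List.mem_toFinset, hl, PySem.Set.mem_ofList, List.mem_filter]
    exact ⟨hno n hn.1 hn.2, by simp [hn.1, hn.2]⟩
  have hcard := Finset.card_le_card hsub
  rw [Int.card_Ioc, List.toFinset_card_of_nodup (PySem.Set.nodup_ofList _)] at hcard
  rw [← hl] at hcard
  omega

-- B's scan on a ≤-sorted list returns the least value ≥ a that is not in the list.
theorem pvBScan_char (l : List Int) (hs : l.Pairwise (· ≤ ·)) (a : Int) :
    a ≤ pvBScan a l ∧ pvBScan a l ∉ l ∧ ∀ m, a ≤ m → m < pvBScan a l → m ∈ l := by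
  induction l generalizing a with
  | nil =>
    refine ⟨le_refl a, List.not_mem_nil, fun m h1 h2 => ?_⟩
    simp [pvBScan] at h2; omega
  | cons x rest ih =>
    rcases List.pairwise_cons.mp hs with ⟨hx, hrest⟩
    by_cases h1 : x < a
    · have hstep : pvBScan a (x :: rest) = pvBScan a rest := by simp [pvBScan, h1]
      rcases ih hrest a with ⟨g1, g2, g3⟩
      rw [hstep]
      refine ⟨g1, ?_, ?_⟩
      · simp only [List.mem_cons, not_or]; exact ⟨by omega, g2⟩
      · intro m hm1 hm2; exact List.mem_cons_of_mem _ (g3 m hm1 hm2)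
    · by_cases h2 : x = a
      · have hstep : pvBScan a (x :: rest) = pvBScan (a + 1) rest := by
          simp [pvBScan, h2]
        rcases ih hrest (a + 1) with ⟨g1, g2, g3⟩
        rw [hstep]
        refine ⟨by omega, ?_, ?_⟩
        · simp only [List.mem_cons, not_or]; exact ⟨by omega, g2⟩
        · intro m hm1 hm2
          by_cases hma : m = a
          · simp [hma, h2]
          · exact List.mem_cons_of_mem _ (g3 m (by omega) hm2)
      · have hstep : pvBScan a (x :: rest) = a := by simp [pvBScan, h1, h2]
        rw [hstep]
        refine ⟨le_refl a, ?_, ?_⟩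
        · simp only [List.mem_cons, not_or]
          refine ⟨fun h => h2 h.symm, fun hmem => ?_⟩
          have := hx a hmem; omega
        · intro m hm1 hm2; omega

-- A's loop hits r when r is the least free id above next_id and the fuel is sufficient.
theorem pvALoop_eq (max_id : Int) (ids : List Int) (r : Int)
    (hrn : r ∉ ids) (hrm : r ≤ max_id) :
    ∀ (fuel : Nat) (next_id : Int), next_id < r →
      (∀ m, next_id < m → m < r → m ∈ ids) → (r - next_id).toNat ≤ fuel →
      pvALoop max_id ids next_id fuel = r := by
  intro fuel
  induction fuel with
  | zero => intro next_id h1 _ h3; omega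
  | succ fuel ih =>
    intro next_id h1 h2 h3
    have hnle : next_id + 1 ≤ r := by omega
    simp only [pvALoop]
    have hng : ¬ (next_id + 1 > max_id) := by omega
    rw [if_neg hng]
    by_cases hc : (next_id + 1) ∈ ids
    · have hne : next_id + 1 ≠ r := fun h => hrn (h ▸ hc)
      rw [if_pos (by simpa using hc)]
      exact ih (next_id + 1) (by omega) (fun m hm1 hm2 => h2 m (by omega) hm2) (by omega)
    · have heq : next_id + 1 = r := by
        by_contra hne
        exact hc (h2 (next_id + 1) (by omega) (by omega))
      rw [if_neg (by simpa using hc)]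
      exact heq

-- ===== VERDICT (by name: the statement is the Claim_ definition above) =====
theorem get_next_available_mondo_id_py_spec : Claim_equal_get_next_available_mondo_id_py := by
  intro min_id max_id ids _ hpre
  unfold Spec_get_next_available_mondo_id_py
  rcases pvPre_exists min_id max_id ids hpre with ⟨n0, hn0a, hn0b, hn0⟩
  set cands := PySem.List.sorted (ids.filter (fun i => decide (min_id < i) && decide (i ≤ max_id))) (fun x => x) false with hcands
  have hmemc : ∀ m : Int, m ∈ cands ↔ m ∈ ids ∧ min_id < m ∧ m ≤ max_id := by
    intro m
    rw [hcands, PySem.List.mem_sorted, List.mem_filter]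
    simp
  have hs : cands.Pairwise (· ≤ ·) := PySem.List.sorted_pairwise _ _
  set e := pvBScan (min_id + 1) cands with he
  rcases pvBScan_char cands hs (min_id + 1) with ⟨g1, g2, g3⟩
  -- e ≤ n0 ≤ max_id
  have hemax : e ≤ max_id := by
    by_contra h
    have hn0e : n0 < e := by omega
    have := (hmemc n0).mp (g3 n0 (by omega) hn0e)
    exact hn0 this.1
  -- e is free in ids
  have hef : e ∉ ids := by
    intro hin
    exact g2 ((hmemc e).mpr ⟨hin, by omega, hemax⟩)
  -- everything strictly between min_id and e is in ids
  have hfill : ∀ m, min_id < m → m < e → m ∈ ids := by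
    intro m hm1 hm2
    exact ((hmemc m).mp (g3 m (by omega) hm2)).1
  have hA : pvALoop max_id ids min_id ((max_id - min_id).toNat + 1) = e :=
    pvALoop_eq max_id ids e hef hemax _ min_id (by omega) hfill (by omega)
  show (pvALoop max_id ids min_id ((max_id - min_id).toNat + 1),
        PySem.Set.add ids (pvALoop max_id ids min_id ((max_id - min_id).toNat + 1))) = _
  rw [hA]
  show (e, PySem.Set.add ids e) =
    if e > max_id then ((0 : Int), ids) else (e, PySem.Set.add ids e)
  rw [if_neg (show ¬ e > max_id by omega)]
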